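-- pv_equiv track=rewrite | github.com/paulonteri/google-get-ahead-africa | exercises/car_plate_vocabluary.py | find_shortest_word
-- ===== SOURCE A (Python) =====
-- def is_valid_word(plate_letters, word):
--
--     # get all letters from the word
--     word_letters = {}
--     for char in word:
--         letter = char.lower()
--         if letter in word_letters:
--             word_letters[letter] = word_letters[letter] + 1
--         else:
--             word_letters[letter] = 1
--
--     # check if it does not match all the letters from the plate
--     for plate_letter, plate_letter_count in plate_letters.items():
--         if plate_letter not in word_letters:
--             return False
--         if word_letters[plate_letter] < plate_letter_count:
--             return False
--
--     return True
--
-- def find_shortest_word(plate, vocabulary):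
--     shortest_valid_word = ""
--
--     # get all letters from the plate
--     plate_letters = {}
--     for char in plate:
--         if char.isalpha():
--             letter = char.lower()
--             if letter in plate_letters:
--                 plate_letters[letter] = plate_letters[letter] + 1
--             else:
--                 plate_letters[letter] = 1
--
--     for word in vocabulary:
--         if is_valid_word(plate_letters, word) and (
--                 shortest_valid_word == "" or len(word) < len(shortest_valid_word)):
--             shortest_valid_word = word
--
--     return shortest_valid_word
-- ===== SOURCE B (Python) =====
-- def find_shortest_word(plate, vocabulary):
--     # letters (lower-cased) required by the plate, with multiplicities
--     needed = {}
--     for char in plate: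
--         if char.isalpha():
--             letter = char.lower()
--             needed[letter] = needed.get(letter, 0) + 1
--
--     # scan the vocabulary in (stable) length order and return the first word
--     # that covers the plate; stability keeps A's earliest-shortest tie-break
--     for word in sorted(vocabulary, key=len):
--         lowered = word.lower()
--         if all(lowered.count(letter) >= count for letter, count in needed.items()):
--             return word
--     return ""
-- ===== Notes on version B (the rewrite author's own statement) =====
-- stated objective: alternative
-- what changed: B stably sorts the vocabulary by word length and returns the first word that covers the plate (coverage tested by per-letter counts on the lower-cased word, no word-frequency dict), instead of A's single scan with a running shortest-so-far and a helper that builds a letter dict per word.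
-- intended difference: On plates with no letters when the vocabulary contains "" somewhere before its last word, A's ""-sentinel conflates the valid empty word with 'no valid word yet' so any later word overwrites it and A returns that longer word (e.g. 'a' for plate '', vocabulary ['', 'a']); B returns '', the genuinely shortest valid word, which is the intended result. — e.g. on find_shortest_word("", ["", "a"]): A returns "a", B returns ""
import Mathlib
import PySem

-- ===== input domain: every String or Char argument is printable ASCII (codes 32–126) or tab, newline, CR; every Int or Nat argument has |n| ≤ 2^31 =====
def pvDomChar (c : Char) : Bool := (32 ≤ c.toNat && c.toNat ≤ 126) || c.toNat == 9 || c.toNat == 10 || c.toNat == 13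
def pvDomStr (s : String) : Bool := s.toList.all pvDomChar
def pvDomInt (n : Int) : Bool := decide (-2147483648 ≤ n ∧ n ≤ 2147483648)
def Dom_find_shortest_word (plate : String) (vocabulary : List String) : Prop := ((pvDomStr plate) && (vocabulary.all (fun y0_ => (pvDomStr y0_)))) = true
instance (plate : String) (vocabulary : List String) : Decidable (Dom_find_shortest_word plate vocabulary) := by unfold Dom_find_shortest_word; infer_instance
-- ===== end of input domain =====

-- B sorts the vocabulary stably by length and returns the first word whose per-letter counts
-- cover the plate's, instead of A's running-shortest scan with a per-word letter dict;
-- objective: alternative decomposition, same asymptotics up to the sort.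
-- On plates with no letters where the vocabulary contains "" not in last position, A's ""-sentinel
-- quirk makes it return a longer word; B returns "" (the shortest valid word) — see D_ below.

-- ===== PORT A =====
-- A's letter-counting loop body (if letter in d: d[l] += 1 else d[l] = 1)
def pvCountStepA (d : PySem.Dict Char Int) (ch : Char) : PySem.Dict Char Int :=
  let l := PySem.Chars.lowerChar ch
  if d.contains l then d.insert l (d.getD l 0 + 1) else d.insert l 1

-- A's for-loop over plate_letters.items() with its two early returns
def pvIsValidLoop (wl : PySem.Dict Char Int) : List (Char × Int) → Bool
  | [] => true
  | (k, c) :: rest =>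
    if !(wl.contains k) then false
    else if wl.getD k 0 < c then false
    else pvIsValidLoop wl rest

def is_valid_word (plate_letters : PySem.Dict Char Int) (word : String) : Bool :=
  let word_letters := word.toList.foldl pvCountStepA PySem.Dict.empty
  pvIsValidLoop word_letters plate_letters.items

def find_shortest_word (plate : String) (vocabulary : List String) : String :=
  let plate_letters := plate.toList.foldl
    (fun d ch => if PySem.Chars.isalpha ch then pvCountStepA d ch else d) PySem.Dict.empty
  vocabulary.foldl
    (fun s w =>
      if is_valid_word plate_letters w && (s == "" || PySem.Str.len w < PySem.Str.len s)
      then w else s) ""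

-- ===== PORT B =====
-- B's counting loop body (needed[l] = needed.get(l, 0) + 1)
def pvCountStepB (d : PySem.Dict Char Int) (ch : Char) : PySem.Dict Char Int :=
  d.insert (PySem.Chars.lowerChar ch) (d.getD (PySem.Chars.lowerChar ch) 0 + 1)

-- B's coverage test: all(lowered.count(letter) >= count for letter, count in needed.items());
-- lowered.count(letter) for a single character is exactly List.count on the lower-cased chars
def pvCoversB (needed : PySem.Dict Char Int) (word : String) : Bool :=
  needed.items.all (fun kc =>
    decide (kc.2 ≤ ((PySem.Chars.lower word.toList).count kc.1 : Int)))

def find_shortest_word_alt (plate : String) (vocabulary : List String) : String :=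
  let needed := plate.toList.foldl
    (fun d ch => if PySem.Chars.isalpha ch then pvCountStepB d ch else d) PySem.Dict.empty
  match (PySem.List.sorted vocabulary PySem.Str.len).find? (pvCoversB needed) with
  | some w => w
  | none => ""

-- ===== PRECONDITION & SPEC =====
-- When the plate has no letters the empty word is valid (and shortest), but A's ""-sentinel
-- conflates it with "no valid word yet", so any word after the last "" overwrites it and A
-- returns that longer word; B returns "", the genuinely shortest valid word, which is intended.
def D_find_shortest_word (plate : String) (vocabulary : List String) : Prop :=
  (∀ c ∈ plate.toList, PySem.Chars.isalpha c = false) ∧ "" ∈ vocabulary ∧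
    vocabulary.getLast? ≠ some ""
instance (plate : String) (vocabulary : List String) : Decidable (D_find_shortest_word plate vocabulary) := by unfold D_find_shortest_word; infer_instance

def Spec_find_shortest_word (plate : String) (vocabulary : List String) (out : String) : Prop := ¬ D_find_shortest_word plate vocabulary → out = find_shortest_word_alt plate vocabulary
instance (plate : String) (vocabulary : List String) (out : String) : Decidable (Spec_find_shortest_word plate vocabulary out) := by unfold Spec_find_shortest_word; infer_instance

def pvDiffWitness_find_shortest_word : String × List String := ("", ["", "a"])
def pvDiffWitnessOut_find_shortest_word : String × String := ("a", "")

-- ===== CLAIM (what is proved, stated in full; the proofs are below) =====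
def Claim_unchanged_find_shortest_word : Prop := ∀ (plate : String) (vocabulary : List String), Dom_find_shortest_word plate vocabulary → Spec_find_shortest_word plate vocabulary (find_shortest_word plate vocabulary)
def Claim_changed_find_shortest_word : Prop := Dom_find_shortest_word (pvDiffWitness_find_shortest_word.1) (pvDiffWitness_find_shortest_word.2) ∧ D_find_shortest_word (pvDiffWitness_find_shortest_word.1) (pvDiffWitness_find_shortest_word.2) ∧ find_shortest_word (pvDiffWitness_find_shortest_word.1) (pvDiffWitness_find_shortest_word.2) = pvDiffWitnessOut_find_shortest_word.1 ∧ find_shortest_word_alt (pvDiffWitness_find_shortest_word.1) (pvDiffWitness_find_shortest_word.2) = pvDiffWitnessOut_find_shortest_word.2 ∧ pvDiffWitnessOut_find_shortest_word.1 ≠ pvDiffWitnessOut_find_shortest_word.2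
def Claim_exact_find_shortest_word : Prop := ∀ (plate : String) (vocabulary : List String), Dom_find_shortest_word plate vocabulary → D_find_shortest_word plate vocabulary → find_shortest_word plate vocabulary ≠ find_shortest_word_alt plate vocabulary

-- ===== LEMMAS AND PROOFS =====

-- abbreviations used only by the proofs
def pvG (s w : String) : String :=
  if s == "" || PySem.Str.len w < PySem.Str.len s then w else s
def pvM (b y : String) : String :=
  if PySem.Str.len y < PySem.Str.len b then y else b
-- the plate's required letters as a plain list (lower-cased letters of the plate)
def pvYs (plate : String) : List Char :=
  (plate.toList.filter PySem.Chars.isalpha).map PySem.Chars.lowerChar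

lemma pv_eq_empty_of_len_nonpos {s : String} (h : PySem.Str.len s ≤ 0) : s = "" := by
  rw [PySem.Str.len_eq] at h
  have h1 : s.toList.length = 0 := by omega
  exact String.toList_eq_nil_iff.mp (List.length_eq_zero_iff.mp h1)

-- the two counting loop bodies agree
lemma pv_countStep_eq (d : PySem.Dict Char Int) (ch : Char) :
    pvCountStepA d ch = pvCountStepB d ch := by
  unfold pvCountStepA pvCountStepB
  by_cases hc : d.contains (PySem.Chars.lowerChar ch) = true
  · simp [hc]
  · simp only [Bool.not_eq_true] at hc
    rw [if_neg (by simp [hc]), PySem.Dict.getD_of_not_contains d 0 hc]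
    norm_num

-- a guarded-and-mapped counting loop is Counter of the filtered, mapped list
lemma pv_guarded_fold_counter (cs : List Char) :
    cs.foldl (fun d ch => if PySem.Chars.isalpha ch then pvCountStepB d ch else d)
        PySem.Dict.empty
      = PySem.Dict.counter ((cs.filter PySem.Chars.isalpha).map PySem.Chars.lowerChar) := by
  rw [← PySem.Dict.foldl_insert_getD_add_one_eq_counter, List.foldl_map, List.foldl_filter]
  rfl

-- a bare counting loop is Counter of the lower-cased word
lemma pv_fold_counter (cs : List Char) :
    cs.foldl pvCountStepB PySem.Dict.empty
      = PySem.Dict.counter (cs.map PySem.Chars.lowerChar) := by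
  rw [← PySem.Dict.foldl_insert_getD_add_one_eq_counter, List.foldl_map]
  rfl

-- A's early-return loop is an all over the items
lemma pv_loop_all (wl : PySem.Dict Char Int) (items : List (Char × Int)) :
    pvIsValidLoop wl items
      = items.all (fun kc => wl.contains kc.1 && decide (kc.2 ≤ wl.getD kc.1 0)) := by
  induction items with
  | nil => rfl
  | cons kc rest ih =>
    obtain ⟨k, c⟩ := kc
    by_cases hk : wl.contains k = true
    · by_cases hlt : wl.getD k 0 < c
      · simp [pvIsValidLoop, hk, hlt, not_le.mpr hlt]
      · simp [pvIsValidLoop, hk, hlt, not_lt.mp hlt, ih]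
    · simp only [Bool.not_eq_true] at hk
      simp [pvIsValidLoop, hk]

-- A's validity check on a Counter plate dict equals B's count-based coverage test
lemma pv_all_congr_mem {a : Type} (l : List a) (f g : a -> Bool)
    (h : ∀ x ∈ l, f x = g x) : l.all f = l.all g := by
  induction l with
  | nil => rfl
  | cons x t ih =>
    rw [List.all_cons, List.all_cons, h x (List.mem_cons_self ..),
      ih (fun y hy => h y (List.mem_cons_of_mem _ hy))]

-- A's validity check on a Counter plate dict equals B's count-based coverage test
lemma pv_valid_eq (ys : List Char) (w : String) :
    is_valid_word (PySem.Dict.counter ys) w = pvCoversB (PySem.Dict.counter ys) w := by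
  have hwl : w.toList.foldl pvCountStepA PySem.Dict.empty
      = PySem.Dict.counter (w.toList.map PySem.Chars.lowerChar) := by
    rw [PySem.List.foldl_congr_mem w.toList pvCountStepA pvCountStepB PySem.Dict.empty
      (fun acc x _ => pv_countStep_eq acc x), pv_fold_counter]
  show pvIsValidLoop (w.toList.foldl pvCountStepA PySem.Dict.empty)
      (PySem.Dict.counter ys).items = _
  rw [hwl, pv_loop_all]
  unfold pvCoversB
  rw [PySem.Dict.items_counter, List.all_map, List.all_map]
  apply pv_all_congr_mem
  intro k hk
  have hkys : k ∈ ys := (PySem.Set.mem_ofList ys k).mp hk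
  have hc1 : 1 ≤ ys.count k := List.count_pos_iff.mpr hkys
  have hlow : PySem.Chars.lower w.toList = w.toList.map PySem.Chars.lowerChar := rfl
  simp only [Function.comp, PySem.Dict.contains_counter, PySem.Dict.getD_counter, hlow]
  by_cases hle : ((ys.count k : Int) <= ((w.toList.map PySem.Chars.lowerChar).count k : Int))
  · have hmem : k ∈ w.toList.map PySem.Chars.lowerChar := by
      refine List.count_pos_iff.mp ?_
      omega
    simp [hle]
    exact List.mem_map.mp hmem
  · simp [hle]

-- inserting a non-matching element does not change the first match
lemma pv_find?_insertBy_neg (p : String → Bool) (b : String → String → Bool)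
    (x : String) (ys : List String) (hx : p x = false) :
    (PySem.List.insertBy b x ys).find? p = ys.find? p := by
  induction ys with
  | nil => simp [PySem.List.insertBy, hx]
  | cons y t ih =>
    show (if b x y then x :: y :: t else y :: PySem.List.insertBy b x t).find? p = _
    split
    · simp [List.find?, hx]
    · cases hy : p y <;> simp [List.find?, hy, ih]

-- inserting a matching element into a key-sorted list: the new first match
lemma pv_find?_insertBy_pos (p : String → Bool) (key : String → Int)
    (x : String) (ys : List String)
    (hs : ys.Pairwise (fun a b => key a ≤ key b)) (hx : p x = true) :
    (PySem.List.insertBy (fun a b => decide (key a < key b)) x ys).find? p =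
      match ys.find? p with
      | none => some x
      | some m => if key x < key m then some x else some m := by
  induction ys with
  | nil => simp [PySem.List.insertBy, hx]
  | cons y t ih =>
    show (if decide (key x < key y) then x :: y :: t
        else y :: PySem.List.insertBy (fun a b => decide (key a < key b)) x t).find? p = _
    rcases List.pairwise_cons.mp hs with ⟨hyt, ht⟩
    by_cases hxy : key x < key y
    · rw [if_pos (by simpa using hxy)]
      cases hy : p y with
      | true => simp [List.find?, hx, hy, hxy]
      | false =>
        cases hm : t.find? p with
        | none => simp [List.find?, hx, hy, hm]
        | some m =>
          have hmt : m ∈ t := List.mem_of_find?_eq_some hm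
          have hxm : key x < key m := lt_of_lt_of_le hxy (hyt m hmt)
          simp [List.find?, hx, hy, hm, hxm]
    · rw [if_neg (by simpa using hxy)]
      cases hy : p y with
      | true =>
        simp [List.find?, hy, not_lt_of_ge (not_lt.mp hxy)]
      | false => simp [List.find?, hy, ih ht]

-- min over an extended list, as Python's running-min step
lemma pv_min?_snoc (l : List String) (x : String) :
    PySem.List.min? (l ++ [x]) PySem.Str.len =
      match PySem.List.min? l PySem.Str.len with
      | none => some x
      | some m => if PySem.Str.len x < PySem.Str.len m then some x else some m := by
  show List.foldl _ none (l ++ [x]) = _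
  rw [List.foldl_append]
  show List.foldl _ (PySem.List.min? l PySem.Str.len) [x] = _
  cases PySem.List.min? l PySem.Str.len <;> rfl

-- the first match in the length-sorted vocabulary is min over the valid words (first minimum)
lemma pv_find?_sorted (p : String -> Bool) (xs : List String) :
    (PySem.List.sorted xs PySem.Str.len).find? p
      = PySem.List.min? (xs.filter p) PySem.Str.len := by
  induction xs using List.reverseRecOn with
  | nil => rfl
  | append_singleton xs x ih =>
    have hins : PySem.List.sorted (xs ++ [x]) PySem.Str.len
        = PySem.List.insertBy (fun a b => decide (PySem.Str.len a < PySem.Str.len b)) x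
            (PySem.List.sorted xs PySem.Str.len) := by
      rw [PySem.List.sorted_eq_foldl_insertBy, List.foldl_append,
        ← PySem.List.sorted_eq_foldl_insertBy]
      rfl
    have hfil : (xs ++ [x]).filter p = xs.filter p ++ [x].filter p := List.filter_append ..
    cases hx : p x with
    | false =>
      rw [hins, pv_find?_insertBy_neg p _ x _ hx, ih, hfil, List.filter_singleton, hx]
      simp
    | true =>
      rw [hins, pv_find?_insertBy_pos p PySem.Str.len x _
          (PySem.List.sorted_pairwise xs PySem.Str.len) hx, ih, hfil,
        List.filter_singleton, hx]
      show _ = PySem.List.min? (xs.filter p ++ [x]) PySem.Str.len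
      rw [pv_min?_snoc]

-- A's scan over vocabulary equals the scan over the filtered list
lemma pv_foldl_filter (p : String → Bool) (xs : List String) (s : String) :
    xs.foldl (fun s w => if p w && (s == "" || PySem.Str.len w < PySem.Str.len s) then w else s) s
      = (xs.filter p).foldl pvG s := by
  induction xs generalizing s with
  | nil => rfl
  | cons w t ih =>
    by_cases hp : p w = true
    · have hf : (if (p w && (s == "" || decide (PySem.Str.len w < PySem.Str.len s))) = true
          then w else s) = pvG s w := by rw [hp]; rfl
      rw [List.foldl_cons, List.filter_cons_of_pos hp, List.foldl_cons, hf, ih]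
    · simp only [Bool.not_eq_true] at hp
      have hf : (if (p w && (s == "" || decide (PySem.Str.len w < PySem.Str.len s))) = true
          then w else s) = s := by rw [hp]; rfl
      rw [List.foldl_cons, List.filter_cons_of_neg (by simp [hp]), hf, ih]

-- min? as a plain fold once the list is nonempty
lemma pv_min?_cons : ∀ (t : List String) (w : String),
    PySem.List.min? (w :: t) PySem.Str.len = some (t.foldl pvM w)
  | [], w => rfl
  | y :: t, w => by
    have h1 : PySem.List.min? (w :: y :: t) PySem.Str.len
        = PySem.List.min? (pvM w y :: t) PySem.Str.len := by
      show List.foldl _ (if PySem.Str.len y < PySem.Str.len w then some y else some w) t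
        = List.foldl _ (some (pvM w y)) t
      unfold pvM; split <;> rfl
    rw [h1, pv_min?_cons t (pvM w y), List.foldl_cons]

lemma pv_foldl_g_eq_m (t : List String) (s : String) (hs : s ≠ "")
    (ht : ∀ w ∈ t, w ≠ "") : t.foldl pvG s = t.foldl pvM s := by
  induction t generalizing s with
  | nil => rfl
  | cons w t ih =>
    have hw : w ≠ "" := ht w (List.mem_cons_self ..)
    have hse : (s == "") = false := beq_eq_false_iff_ne.mpr hs
    have hstep : pvG s w = pvM s w := by simp [pvG, pvM, hse]
    rw [List.foldl_cons, List.foldl_cons, hstep]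
    refine ih (pvM s w) ?_ (fun x hx => ht x (List.mem_cons_of_mem _ hx))
    unfold pvM; split <;> assumption

lemma pv_foldl_g_ne_empty (t : List String) (s : String) (hs : s ≠ "")
    (ht : ∀ w ∈ t, w ≠ "") : t.foldl pvG s ≠ "" := by
  induction t generalizing s with
  | nil => exact hs
  | cons w t ih =>
    rw [List.foldl_cons]
    refine ih (pvG s w) ?_ (fun x hx => ht x (List.mem_cons_of_mem _ hx))
    have hw : w ≠ "" := ht w (List.mem_cons_self ..)
    unfold pvG; split <;> assumption

-- coverage by an empty requirement list is trivial
lemma pv_covers_nil (w : String) : pvCoversB (PySem.Dict.counter ([] : List Char)) w = true := by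
  rfl

-- the empty word covers the plate iff the plate requires no letters
lemma pv_covers_empty_iff (ys : List Char) :
    pvCoversB (PySem.Dict.counter ys) "" = true ↔ ys = [] := by
  constructor
  · intro hall
    cases hys : ys with
    | nil => rfl
    | cons c cs =>
      unfold pvCoversB at hall
      rw [PySem.Dict.items_counter] at hall
      have hc : c ∈ PySem.Set.ofList ys := (PySem.Set.mem_ofList ys c).mpr (by simp [hys])
      have := List.all_eq_true.mp hall _ (List.mem_map_of_mem hc)
      have hcnt : 1 ≤ ys.count c := List.count_pos_iff.mpr (by simp [hys])
      have hzero : (PySem.Chars.lower "".toList).count c = 0 := rfl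
      simp only [hzero, decide_eq_true_eq] at this
      omega
  · intro h; subst h; rfl

lemma pv_g_empty_right (s : String) : pvG s "" = "" := by
  by_cases hs : s = ""
  · subst hs; rfl
  · simp [pvG, hs]

lemma pv_g_empty_left (w : String) : pvG "" w = w := by simp [pvG]

-- inside D_, A's scan never ends on ""
lemma pv_foldl_g_ne_of_last (vocab : List String) (s : String)
    (hmem : "" ∈ vocab) (hlast : vocab.getLast? ≠ some "") :
    vocab.foldl pvG s ≠ "" := by
  induction vocab generalizing s with
  | nil => cases hmem
  | cons w rest ih =>
    rw [List.foldl_cons]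
    by_cases hr : "" ∈ rest
    · have hrne : rest ≠ [] := List.ne_nil_of_mem hr
      have hlast' : rest.getLast? ≠ some "" := by
        rwa [show (w :: rest).getLast? = rest.getLast? from by
          cases rest with
          | nil => exact absurd rfl hrne
          | cons a b => rfl] at hlast
      exact ih (pvG s w) hr hlast'
    · have hw : w = "" := by
        rcases List.mem_cons.mp hmem with h | h
        · exact h.symm
        · exact absurd h hr
      subst hw
      rw [pv_g_empty_right]
      cases rest with
      | nil => exact absurd (by rfl) hlast
      | cons r rest' =>
        rw [List.foldl_cons, pv_g_empty_left]
        exact pv_foldl_g_ne_empty rest' r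
          (fun h => hr (h ▸ List.mem_cons_self ..))
          (fun x hx h => hr (h ▸ List.mem_cons_of_mem _ hx))

-- find_shortest_word rewritten through pvCoversB / pvG
lemma pv_A_eq (plate : String) (vocabulary : List String) :
    find_shortest_word plate vocabulary =
      (vocabulary.filter (pvCoversB (PySem.Dict.counter (pvYs plate)))).foldl pvG "" := by
  have hd : plate.toList.foldl
      (fun d ch => if PySem.Chars.isalpha ch then pvCountStepA d ch else d) PySem.Dict.empty
      = PySem.Dict.counter (pvYs plate) := by
    rw [PySem.List.foldl_congr_mem plate.toList _
        (fun d ch => if PySem.Chars.isalpha ch then pvCountStepB d ch else d) PySem.Dict.empty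
        (fun acc x _ => by
          by_cases hx : PySem.Chars.isalpha x = true <;>
            simp [hx, pv_countStep_eq]),
      pv_guarded_fold_counter]
    rfl
  show vocabulary.foldl
      (fun s w =>
        if is_valid_word (plate.toList.foldl
            (fun d ch => if PySem.Chars.isalpha ch then pvCountStepA d ch else d)
            PySem.Dict.empty) w
          && (s == "" || PySem.Str.len w < PySem.Str.len s) then w else s) "" = _
  rw [hd]
  rw [PySem.List.foldl_congr_mem vocabulary _
      (fun s w =>
        if pvCoversB (PySem.Dict.counter (pvYs plate)) w
          && (s == "" || PySem.Str.len w < PySem.Str.len s) then w else s) ""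
      (fun acc x _ => by rw [pv_valid_eq])]
  exact pv_foldl_filter _ vocabulary ""

-- B's value, rewritten as the first minimum of the filtered list
lemma pv_B_eq (plate : String) (vocabulary : List String) :
    find_shortest_word_alt plate vocabulary =
      match PySem.List.min? (vocabulary.filter (pvCoversB (PySem.Dict.counter (pvYs plate))))
          PySem.Str.len with
      | some m => m
      | none => "" := by
  show (match (PySem.List.sorted vocabulary PySem.Str.len).find?
        (pvCoversB (plate.toList.foldl
          (fun d ch => if PySem.Chars.isalpha ch then pvCountStepB d ch else d)
          PySem.Dict.empty)) with
      | some w => w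
      | none => "") = _
  rw [pv_guarded_fold_counter, pv_find?_sorted]
  rfl

-- ===== VERDICT (by name: the statement is the Claim_ definition above) =====
theorem find_shortest_word_spec : Claim_unchanged_find_shortest_word := by
  intro plate vocabulary hdom hnD
  rw [pv_A_eq, pv_B_eq]
  set pl := PySem.Dict.counter (pvYs plate) with hpl
  by_cases hz : "" ∈ vocabulary.filter (pvCoversB pl)
  · have hcov : pvCoversB pl "" = true := (List.mem_filter.mp hz).2
    have hys : pvYs plate = [] := (pv_covers_empty_iff (pvYs plate)).mp hcov
    have hnoalpha : ∀ c ∈ plate.toList, PySem.Chars.isalpha c = false := by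
      have hfil : plate.toList.filter PySem.Chars.isalpha = [] :=
        List.map_eq_nil_iff.mp hys
      intro c hc
      exact Bool.not_eq_true _ ▸ List.filter_eq_nil_iff.mp hfil c hc
    have hlv : vocabulary.filter (pvCoversB pl) = vocabulary :=
      List.filter_eq_self.mpr (fun w _ => by rw [hpl, hys]; exact pv_covers_nil w)
    rw [hlv] at hz ⊢
    have hlast : vocabulary.getLast? = some "" := by
      by_contra hcon
      exact hnD ⟨hnoalpha, hz, hcon⟩
    have hne : vocabulary ≠ [] := List.ne_nil_of_mem hz
    have hAside : vocabulary.foldl pvG "" = "" := by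
      conv_lhs => rw [← List.dropLast_concat_getLast hne]
      rw [List.foldl_append, List.foldl_cons, List.foldl_nil]
      have hg : vocabulary.getLast hne = "" := by
        rw [List.getLast?_eq_some_getLast hne] at hlast
        exact Option.some_inj.mp hlast
      rw [hg, pv_g_empty_right]
    obtain ⟨w, t, hcons⟩ : ∃ w t, vocabulary = w :: t := by
      cases vocabulary with
      | nil => exact absurd rfl hne
      | cons a b => exact ⟨a, b, rfl⟩
    rw [hAside, hcons, pv_min?_cons]
    show ("" : String) = t.foldl pvM w
    have h0 : PySem.Str.len "" = 0 := by decide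
    have hle := PySem.List.min?_isMin (pv_min?_cons t w) "" (hcons ▸ hz)
    rw [h0] at hle
    exact (pv_eq_empty_of_len_nonpos hle).symm
  · cases hlc : vocabulary.filter (pvCoversB pl) with
    | nil => rfl
    | cons w t =>
      rw [pv_min?_cons]
      have hw : w ≠ "" := fun h => hz (by rw [hlc, ← h]; exact List.mem_cons_self ..)
      have ht : ∀ x ∈ t, x ≠ "" := fun x hx h => by
        subst h; exact hz (by rw [hlc]; exact List.mem_cons_of_mem _ hx)
      show (w :: t).foldl pvG "" = t.foldl pvM w
      rw [List.foldl_cons, pv_g_empty_left]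
      exact pv_foldl_g_eq_m t w hw ht

theorem find_shortest_word_changed : Claim_changed_find_shortest_word := by
  unfold Claim_changed_find_shortest_word pvDiffWitness_find_shortest_word pvDiffWitnessOut_find_shortest_word D_find_shortest_word
  exact ⟨by decide, ⟨by simp, by simp, by simp⟩, by decide, by decide, by decide⟩

theorem find_shortest_word_tight : Claim_exact_find_shortest_word := by
  intro plate vocabulary hdom hD
  obtain ⟨hna, hmem, hlast⟩ := hD
  have hys : pvYs plate = [] := by
    unfold pvYs
    rw [List.filter_eq_nil_iff.mpr (fun c hc => by rw [hna c hc]; simp)]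
    rfl
  rw [pv_A_eq, pv_B_eq, hys]
  rw [List.filter_eq_self.mpr (fun w _ => pv_covers_nil w)]
  obtain ⟨w, t, hcons⟩ : ∃ w t, vocabulary = w :: t := by
    cases vocabulary with
    | nil => cases hmem
    | cons a b => exact ⟨a, b, rfl⟩
  subst hcons
  rw [pv_min?_cons]
  show (w :: t).foldl pvG "" ≠ t.foldl pvM w
  have hB : t.foldl pvM w = "" := by
    have h0 : PySem.Str.len "" = 0 := by decide
    have hle := PySem.List.min?_isMin (pv_min?_cons t w) "" hmem
    rw [h0] at hle
    exact pv_eq_empty_of_len_nonpos hle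
  rw [hB]
  exact pv_foldl_g_ne_of_last (w :: t) "" hmem hlast
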